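-- pv_equiv track=rewrite | github.com/MariaMsu/InfoSearch | HW_5/model_error.py | bi_symbols
-- ===== SOURCE A (Python) =====
-- def bi_symbols(string):
--     if not string:
--         return ["^_"]
--     new_string = ["^" + string[0]]
--     for i in range(len(string) - 1):
--         new_string += [string[i:i + 2]]
--     new_string += [string[-1:] + "_"]
--     return new_string
-- ===== SOURCE B (Python) =====
-- def bi_symbols(string):
--     out = []
--     prev = "^"
--     for c in string:
--         out.append(prev + c)
--         prev = c
--     out.append(prev + "_")
--     return out
-- ===== Notes on version B (the rewrite author's own statement) =====
-- stated objective: simpler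
-- what changed: Replaces A's index-based construction (empty-string guard, string[0], the string[i:i+2] slicing loop, string[-1:]) by a single character-at-a-time pass that carries only the previous symbol (initialised to the start marker) in an accumulator, emitting one bigram per character plus a final end-marker bigram; no indices, slices or special cases.
import Mathlib
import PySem

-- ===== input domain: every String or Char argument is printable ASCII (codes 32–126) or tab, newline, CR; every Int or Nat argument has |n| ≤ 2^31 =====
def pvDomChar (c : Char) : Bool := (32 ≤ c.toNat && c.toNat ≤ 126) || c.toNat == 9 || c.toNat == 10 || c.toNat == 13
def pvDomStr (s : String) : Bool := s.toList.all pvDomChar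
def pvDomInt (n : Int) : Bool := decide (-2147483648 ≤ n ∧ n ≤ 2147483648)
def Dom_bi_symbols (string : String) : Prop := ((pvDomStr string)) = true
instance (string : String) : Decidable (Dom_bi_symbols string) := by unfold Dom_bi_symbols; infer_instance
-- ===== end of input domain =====

-- B replaces A's index/slice-based construction (empty guard, string[0], middle slices, string[-1:])
-- by one character-at-a-time pass carrying only the previous symbol in an accumulator (objective: simpler).

-- ===== PORT A =====
def bi_symbols (string : String) : List String :=
  let cs := string.toList
  if cs = [] then ["^_"]
  else
    -- new_string = ["^" + string[0]]  (guard guarantees the index is in range)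
    let new0 : List String := [String.ofList ('^' :: [PySem.List.pyGetD cs 0 ' '])]
    -- for i in range(len(string) - 1): new_string += [string[i:i+2]]
    let mid := (PySem.List.pyRange 0 ((cs.length : Int) - 1) 1).foldl
      (fun acc i => acc ++ [String.ofList (PySem.List.slice cs (some i) (some (i + 2)))]) new0
    -- new_string += [string[-1:] + "_"]
    mid ++ [String.ofList (PySem.List.slice cs (some (-1)) none ++ ['_'])]

-- ===== PORT B =====
def bi_symbols_alt (string : String) : List String :=
  -- out = []; prev = "^"; for c in string: out.append(prev + c); prev = c
  let st := string.toList.foldl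
    (fun (p : List String × Char) c => (p.1 ++ [String.ofList [p.2, c]], c)) ([], '^')
  -- out.append(prev + "_"); return out
  st.1 ++ [String.ofList [st.2, '_']]

-- ===== PRECONDITION & SPEC =====
def Spec_bi_symbols (string : String) (out : List String) : Prop := out = bi_symbols_alt string
instance (string : String) (out : List String) : Decidable (Spec_bi_symbols string out) := by unfold Spec_bi_symbols; infer_instance

-- ===== CLAIM =====
def Claim_equal_bi_symbols : Prop := ∀ (string : String), Dom_bi_symbols string → Spec_bi_symbols string (bi_symbols string)

-- ===== LEMMAS AND PROOFS =====

/-- Recursive normal form: bigrams of `l` preceded by `p`, closed by `'_'`. -/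
def bis (p : Char) : List Char → List String
  | [] => [String.ofList [p, '_']]
  | c :: t => String.ofList [p, c] :: bis c t

/-- All adjacent size-2 windows of `l` (A's middle loop). -/
def win (l : List Char) : List String :=
  (List.range (l.length - 1)).map (fun i => String.ofList ((l.drop i).take 2))

theorem pyWindows_eq_win (l : List Char) :
    (PySem.List.pyRange 0 ((l.length : Int) - 1) 1).map
      (fun i => String.ofList (PySem.List.slice l (some i) (some (i + 2)))) = win l := by
  cases l with
  | nil => simp [win, PySem.List.pyRange]
  | cons c t =>
    have h : ((c :: t).length : Int) - 1 = ((t.length : Nat) : Int) := by simp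
    rw [h, PySem.List.pyRange_zero_natCast, List.map_map, win]
    simp only [List.length_cons, Nat.add_sub_cancel]
    refine List.map_congr_left (fun i _ => ?_)
    have : ((i : Int) + 2) = ((i : Int) + ((2 : Nat) : Int)) := by norm_num
    simp [Function.comp, this, PySem.List.slice_natCast_add]

theorem win_cons_cons (a b : Char) (t : List Char) :
    win (a :: b :: t) = String.ofList [a, b] :: win (b :: t) := by
  simp [win, List.range_succ_eq_map, List.map_map, Function.comp]

/-- A's middle windows plus its final boundary bigram equal the recursive form. -/
theorem win_last_eq_bis (c : Char) (t : List Char) :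
    win (c :: t) ++ [String.ofList ((c :: t).drop ((c :: t).length - 1) ++ ['_'])] = bis c t := by
  induction t generalizing c with
  | nil => simp [win, bis]
  | cons b u ih =>
    rw [win_cons_cons]
    have := ih b
    simp only [List.length_cons, Nat.add_sub_cancel] at this ⊢
    simp [bis, ← this]

/-- B's fold with carried previous char produces the recursive form. -/
theorem foldl_eq_bis (l : List Char) (p : Char) (acc : List String) :
    (let st := l.foldl
      (fun (q : List String × Char) c => (q.1 ++ [String.ofList [q.2, c]], c)) (acc, p)
     st.1 ++ [String.ofList [st.2, '_']]) = acc ++ bis p l := by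
  induction l generalizing p acc with
  | nil => simp [bis]
  | cons c t ih =>
    simpa [bis, List.foldl_cons] using ih c (acc ++ [String.ofList [p, c]])

-- ===== VERDICT =====
theorem bi_symbols_spec : Claim_equal_bi_symbols := by
  intro s _
  unfold Spec_bi_symbols bi_symbols bi_symbols_alt
  cases hcs : s.toList with
  | nil => decide
  | cons c t =>
    show (if (c :: t : List Char) = [] then _ else _) = _
    rw [if_neg (by simp)]
    simp only []
    rw [PySem.List.foldl_append_singleton_eq_map, pyWindows_eq_win, foldl_eq_bis]
    rw [PySem.List.slice_from_neg_one]
    rw [List.append_assoc, win_last_eq_bis c t]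
    simp [PySem.List.pyGetD_zero_cons, bis, String.ofList]
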